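-- pv_equiv track=rewrite | github.com/kpwhri/act_eye_extractor | src/eye_extractor/va/extractor2.py | sum_diopter
-- ===== SOURCE A (Python) =====
-- def sum_diopter(diopter):
--     """
--     Sum diopter values. Assumes no value > 9
--     :param diopter:
--     :return:
--     """
--     start = 0
--     nums = {str(x) for x in range(10)}
--     i = 0
--     while diopter and i < len(diopter):
--         if diopter[i] in {'-', '+'}:
--             if i + 1 < len(diopter) and diopter[i + 1] in nums:
--                 start += int(diopter[i:i + 2])
--                 i += 2
--             else:
--                 start += int(f'{diopter[i]}1')
--                 i += 1
--         elif diopter[i] in nums: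
--             start += int(diopter[i])
--             i += 1
--         else:
--             raise ValueError(f'Unexpected diopter value: {diopter[i]} in {diopter}')
--     return start
-- ===== SOURCE B (Python) =====
-- def sum_diopter(diopter):
--     """One-pass state machine: fold over characters keeping a pending sign;
--     no index arithmetic or lookahead."""
--     total = 0
--     pending = None  # sign (+1/-1) waiting for a digit
--     for ch in diopter:
--         if '0' <= ch <= '9':
--             d = ord(ch) - 48
--             total += pending * d if pending is not None else d
--             pending = None
--         elif ch == '+' or ch == '-':
--             if pending is not None:
--                 total += pending  # flush the dangling sign
--             pending = 1 if ch == '+' else -1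
--         else:
--             raise ValueError(f'Unexpected diopter value: {ch} in {diopter}')
--     if pending is not None:
--         total += pending
--     return total
-- ===== Notes on version B (the rewrite author's own statement) =====
-- stated objective: idiomatic
-- what changed: Replaced A's index-based while loop with lookahead and string slicing by a single forward fold over the characters carrying a pending-sign state that is flushed at the end.
-- outside the precondition, e.g. on sum_diopter('3a'): A raises ValueError, B raises ValueError
import Mathlib
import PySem

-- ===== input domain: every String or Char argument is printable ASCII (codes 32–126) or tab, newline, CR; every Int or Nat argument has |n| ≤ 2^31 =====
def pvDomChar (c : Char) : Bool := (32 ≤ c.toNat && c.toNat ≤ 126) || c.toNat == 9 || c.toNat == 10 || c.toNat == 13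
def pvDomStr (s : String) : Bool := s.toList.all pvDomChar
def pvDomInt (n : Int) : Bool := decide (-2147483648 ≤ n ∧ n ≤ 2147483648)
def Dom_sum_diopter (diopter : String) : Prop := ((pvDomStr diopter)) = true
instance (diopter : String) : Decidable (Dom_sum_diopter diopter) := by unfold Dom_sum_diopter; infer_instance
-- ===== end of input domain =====

-- B replaces A's index/lookahead while-loop by a one-pass fold with a pending-sign state (idiomatic; same cost).
-- Pre_ excludes strings containing a character other than a digit, '+' or '-', on which the Python raises ValueError.


-- ===== PORT A =====
-- the while-loop over index i, ported as recursion on the list of remaining characters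
def sumDiopterLoop (start : Int) : List Char → Int
  | [] => start
  | c :: rest =>
    if c == '-' || c == '+' then
      -- int(diopter[i:i+2]) on a sign followed by one digit = the signed digit (exact there);
      -- int(f'{diopter[i]}1') = the sign applied to 1
      match rest with
      | d :: rest' =>
        if d.isDigit then
          sumDiopterLoop (start + (if c = '+' then 1 else -1) * ((d.toNat : Int) - 48)) rest'
        else
          sumDiopterLoop (start + (if c = '+' then 1 else -1)) (d :: rest')
      | [] => sumDiopterLoop (start + (if c = '+' then 1 else -1)) []
    else if c.isDigit then
      sumDiopterLoop (start + ((c.toNat : Int) - 48)) rest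
    else
      start  -- Python raises ValueError here (excluded by Pre_)

def sum_diopter (diopter : String) : Int :=
  sumDiopterLoop 0 diopter.toList

-- ===== PORT B =====
-- one step of Source B's for-loop: state = (total, pending sign)
def sumDiopterStep (st : Int × Option Int) (c : Char) : Int × Option Int :=
  if c.isDigit then
    let d : Int := (c.toNat : Int) - 48
    match st.2 with
    | some sg => (st.1 + sg * d, none)
    | none => (st.1 + d, none)
  else if c == '+' || c == '-' then
    (match st.2 with | some sg => st.1 + sg | none => st.1,
     some (if c = '+' then 1 else -1))
  else
    st  -- Python raises ValueError here (excluded by Pre_)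

def sum_diopter_alt (diopter : String) : Int :=
  let st := diopter.toList.foldl sumDiopterStep (0, none)
  match st.2 with
  | some sg => st.1 + sg
  | none => st.1

-- ===== PRECONDITION & SPEC =====
-- Pre_ excludes exactly the strings with a character other than a digit, '+' or '-' (Python A raises ValueError; Source B raises too)
def Pre_sum_diopter (diopter : String) : Prop :=
  (diopter.toList.all fun c => c.isDigit || c == '+' || c == '-') = true
instance (diopter : String) : Decidable (Pre_sum_diopter diopter) := by unfold Pre_sum_diopter; infer_instance
def pvWitness_sum_diopter : String := "+3-2+"

def Spec_sum_diopter (diopter : String) (out : Int) : Prop := out = sum_diopter_alt diopter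
instance (diopter : String) (out : Int) : Decidable (Spec_sum_diopter diopter out) := by unfold Spec_sum_diopter; infer_instance

-- ===== CLAIM (what is proved, stated in full; the proofs are below) =====
def Claim_equal_sum_diopter : Prop := ∀ (diopter : String), Dom_sum_diopter diopter → Pre_sum_diopter diopter → Spec_sum_diopter diopter (sum_diopter diopter)

-- ===== LEMMAS AND PROOFS =====
-- finalisation of Source B's state after the loop
def sumDiopterFin (st : Int × Option Int) : Int :=
  match st.2 with
  | some sg => st.1 + sg
  | none => st.1

theorem sumDiopter_key (l : List Char)
    (h : ∀ c ∈ l, (c.isDigit || c == '+' || c == '-') = true) (start : Int) :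
    sumDiopterLoop start l = sumDiopterFin (l.foldl sumDiopterStep (start, none)) := by
  fun_induction sumDiopterLoop start l with
  | case1 start => simp [sumDiopterFin]
  | case2 start c hsign d rest' hdig ih =>
    -- sign then digit: both consume the pair
    have hstep : sumDiopterStep (sumDiopterStep (start, none) c) d
        = ((start + (if c = '+' then 1 else -1) * ((d.toNat : Int) - 48) : Int), none) := by
      rcases (by simpa using hsign : c = '-' ∨ c = '+') with h1 | h1 <;> subst h1 <;>
        simp [sumDiopterStep, hdig]
    rw [ih (fun x hx => h x (by simp [hx]))]
    simp only [List.foldl_cons, hstep]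
  | case3 start c hsign d rest' hdig ih =>
    -- lone sign before a non-digit (by Pre_ a sign): the two states agree after the next step
    have hd' : d = '+' ∨ d = '-' := by
      have := h d (by simp); simp [hdig] at this; tauto
    have hstep : sumDiopterStep (sumDiopterStep (start, none) c) d
        = sumDiopterStep ((start + (if c = '+' then 1 else -1) : Int), none) d := by
      rcases (by simpa using hsign : c = '-' ∨ c = '+') with h1 | h1 <;> subst h1 <;>
        rcases hd' with h2 | h2 <;> subst h2 <;> simp [sumDiopterStep, hdig]
    rw [ih (fun x hx => h x (by simp [hx]))]
    simp only [List.foldl_cons, hstep]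
  | case4 start c hsign ih =>
    -- trailing lone sign
    rcases (by simpa using hsign : c = '-' ∨ c = '+') with h1 | h1 <;> subst h1 <;>
      simp [sumDiopterLoop, sumDiopterStep, sumDiopterFin]
  | case5 start c rest hsign hdig ih =>
    -- plain digit
    have hstep : sumDiopterStep (start, none) c = ((start + ((c.toNat : Int) - 48) : Int), none) := by
      simp [sumDiopterStep, hdig]
    rw [ih (fun x hx => h x (by simp [hx]))]
    simp only [List.foldl_cons, hstep]
  | case6 start c rest hsign hdig =>
    have := h c (by simp); simp [hdig] at this
    rcases this with h1 | h1 <;> simp [h1] at hsign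

-- ===== VERDICT (by name: the statement is the Claim_ definition above) =====
theorem sum_diopter_spec : Claim_equal_sum_diopter := by
  intro diopter _ hpre
  unfold Spec_sum_diopter sum_diopter sum_diopter_alt
  exact sumDiopter_key diopter.toList (List.all_eq_true.mp hpre) 0
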